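-- pv_equiv track=rewrite | github.com/rafaelXVA/aulasSenac | lista 1/exc26.py | soma_pares
-- ===== SOURCE A (Python) =====
-- def soma_pares(list):
--     listR = []
--     listR2 = []
--     for x in list:
--         if x not in listR:
--             listR.append(x)
--         else:
--             listR2.append(x)
--     return sum(listR2)
-- ===== SOURCE B (Python) =====
-- def soma_pares(list):
--     counts = {}
--     for x in list:
--         counts[x] = counts.get(x, 0) + 1
--     return sum(v * (c - 1) for v, c in counts.items())
-- ===== Notes on version B (the rewrite author's own statement) =====
-- stated objective: faster
-- what changed: Replaces the two running lists with their quadratic 'x not in listR' membership scans by a single frequency dict built in one pass, returning sum(v*(c-1)) over its items.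
import Mathlib
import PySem

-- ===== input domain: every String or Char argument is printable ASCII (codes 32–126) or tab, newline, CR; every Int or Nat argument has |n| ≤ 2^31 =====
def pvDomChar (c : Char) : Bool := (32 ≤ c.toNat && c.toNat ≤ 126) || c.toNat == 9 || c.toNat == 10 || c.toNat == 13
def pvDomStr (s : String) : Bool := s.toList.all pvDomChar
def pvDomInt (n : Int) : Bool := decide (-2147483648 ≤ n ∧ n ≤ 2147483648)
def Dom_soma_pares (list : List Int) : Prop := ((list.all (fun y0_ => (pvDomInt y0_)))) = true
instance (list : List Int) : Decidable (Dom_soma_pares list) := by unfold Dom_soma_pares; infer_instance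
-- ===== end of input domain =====

-- B replaces A's two running lists (with quadratic membership scans) by one frequency
-- dict built in a single pass, returning the sum of v*(count-1) over its items.


-- ===== PORT A =====
-- one loop step: 'if x not in listR: listR.append(x) else: listR2.append(x)'
def somaParesStep (st : List Int × List Int) (x : Int) : List Int × List Int :=
  if !(st.1.contains x) then (st.1 ++ [x], st.2) else (st.1, st.2 ++ [x])

def soma_pares (list : List Int) : Int :=
  (list.foldl somaParesStep ([], [])).2.sum

-- ===== PORT B =====
def soma_pares_alt (list : List Int) : Int :=
  ((list.foldl (fun (d : PySem.Dict Int Int) x => d.insert x (d.getD x 0 + 1))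
      PySem.Dict.empty).items.map (fun p => p.1 * (p.2 - 1))).sum

-- ===== PRECONDITION & SPEC =====
def Spec_soma_pares (list : List Int) (out : Int) : Prop := out = soma_pares_alt list
instance (list : List Int) (out : Int) : Decidable (Spec_soma_pares list out) := by unfold Spec_soma_pares; infer_instance

-- ===== CLAIM (what is proved, stated in full; the proofs are below) =====
def Claim_equal_soma_pares : Prop := ∀ (list : List Int), Dom_soma_pares list → Spec_soma_pares list (soma_pares list)

-- ===== LEMMAS AND PROOFS =====

-- conservation: every element lands in exactly one of the two lists
lemma somaPares_conserve (l : List Int) : ∀ (r r2 : List Int),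
    (l.foldl somaParesStep (r, r2)).1.sum + (l.foldl somaParesStep (r, r2)).2.sum
      = r.sum + r2.sum + l.sum := by
  induction l with
  | nil => simp
  | cons x xs ih =>
    intro r r2
    simp only [List.foldl_cons, somaParesStep]
    split_ifs <;> simp [ih] <;> ring

-- membership in the first list = membership in the seed or the input
lemma somaPares_mem (l : List Int) : ∀ (r r2 : List Int) (a : Int),
    a ∈ (l.foldl somaParesStep (r, r2)).1 ↔ a ∈ r ∨ a ∈ l := by
  induction l with
  | nil => simp
  | cons x xs ih =>
    intro r r2 a
    simp only [List.foldl_cons, somaParesStep]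
    split_ifs with h
    · rw [ih]
      simp only [List.mem_append, List.mem_cons]
      tauto
    · have hx : x ∈ r := by simpa using h
      rw [ih]
      simp only [List.mem_cons]
      constructor
      · tauto
      · rintro (ha | hax | ha)
        · tauto
        · subst hax; tauto
        · tauto

-- the first list stays duplicate-free
lemma somaPares_nodup (l : List Int) : ∀ (r r2 : List Int), r.Nodup →
    (l.foldl somaParesStep (r, r2)).1.Nodup := by
  induction l with
  | nil => intro r r2 h; simpa
  | cons x xs ih =>
    intro r r2 h
    simp only [List.foldl_cons, somaParesStep]
    split_ifs with hc
    · refine ih _ _ ?_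
      have hx : x ∉ r := by simpa using hc
      simp [List.nodup_append, h]
      exact fun a ha he => hx (he ▸ ha)
    · exact ih _ _ h

-- the B-side sum of k * count k over the distinct elements is the total sum
lemma sum_mul_count (xs : List Int) :
    ((PySem.Set.ofList xs).map (fun k => k * (xs.count k : Int))).sum = xs.sum := by
  induction xs using List.reverseRecOn with
  | nil => simp [PySem.Set.ofList_nil]
  | append_singleton ys x ih =>
    rw [PySem.Set.ofList_append_singleton]
    have hcount : ∀ k : Int, k ≠ x → ((ys ++ [x]).count k : Int) = (ys.count k : Int) := by
      intro k hk
      rw [List.count_append]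
      simp [Ne.symm hk]
    by_cases hx : x ∈ ys
    · have hmem : x ∈ PySem.Set.ofList ys := (PySem.Set.mem_ofList _ _).2 hx
      rw [PySem.Set.add_of_mem hmem]
      have hnd : (PySem.Set.ofList ys).Nodup := PySem.Set.nodup_ofList ys
      obtain ⟨s, t, hst⟩ := List.append_of_mem hmem
      rw [hst] at hnd
      simp only [List.nodup_append, List.nodup_cons, List.mem_cons] at hnd
      have hxns : x ∉ s := fun hm => hnd.2.2 x hm x (Or.inl rfl) rfl
      have hxnt : x ∉ t := hnd.2.1.1
      have hcx : ((ys ++ [x]).count x : Int) = (ys.count x : Int) + 1 := by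
        simp [List.count_append]
      have hs : (s.map (fun k => k * ((ys ++ [x]).count k : Int))).sum
          = (s.map (fun k => k * (ys.count k : Int))).sum := by
        refine congrArg List.sum (List.map_congr_left fun k hk => ?_)
        rw [hcount k (by rintro rfl; exact hxns hk)]
      have ht : (t.map (fun k => k * ((ys ++ [x]).count k : Int))).sum
          = (t.map (fun k => k * (ys.count k : Int))).sum := by
        refine congrArg List.sum (List.map_congr_left fun k hk => ?_)
        rw [hcount k (by rintro rfl; exact hxnt hk)]
      have key : ((PySem.Set.ofList ys).map (fun k => k * ((ys ++ [x]).count k : Int))).sum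
          = ((PySem.Set.ofList ys).map (fun k => k * (ys.count k : Int))).sum + x := by
        rw [hst]
        simp only [List.map_append, List.map_cons, List.sum_append, List.sum_cons]
        rw [hs, ht, hcx]
        ring
      rw [key, ih]
      simp
    · have hmem : x ∉ PySem.Set.ofList ys := fun h => hx ((PySem.Set.mem_ofList _ _).1 h)
      rw [PySem.Set.add_of_not_mem hmem]
      have hcx : ((ys ++ [x]).count x : Int) = 1 := by
        have h0 : ys.count x = 0 := List.count_eq_zero.2 hx
        simp [List.count_append, h0]
      have hmap : ((PySem.Set.ofList ys).map (fun k => k * ((ys ++ [x]).count k : Int))).sum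
          = ((PySem.Set.ofList ys).map (fun k => k * (ys.count k : Int))).sum := by
        refine congrArg List.sum (List.map_congr_left fun k hk => ?_)
        rw [hcount k (by rintro rfl; exact hx ((PySem.Set.mem_ofList _ _).1 hk))]
      simp only [List.map_append, List.map_cons, List.map_nil, List.sum_append,
        List.sum_cons, List.sum_nil]
      rw [hmap, hcx, ih]
      simp

-- B computes xs.sum − (sum of the distinct elements)
lemma soma_pares_alt_eq (xs : List Int) :
    soma_pares_alt xs = xs.sum - (PySem.Set.ofList xs).sum := by
  unfold soma_pares_alt
  rw [PySem.Dict.foldl_insert_getD_add_one_eq_counter, PySem.Dict.items_counter]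
  rw [List.map_map]
  have : ((PySem.Set.ofList xs).map ((fun p : Int × Int => p.1 * (p.2 - 1)) ∘
      fun k => (k, (xs.count k : Int)))).sum
      = ((PySem.Set.ofList xs).map (fun k => k * (xs.count k : Int))).sum
        - (PySem.Set.ofList xs).sum := by
    induction PySem.Set.ofList xs with
    | nil => simp
    | cons a s ih => simp [ih]; ring
  rw [this, sum_mul_count]

-- ===== VERDICT (by name: the statement is the Claim_ definition above) =====
theorem soma_pares_spec : Claim_equal_soma_pares := by
  intro list _
  unfold Spec_soma_pares
  rw [soma_pares_alt_eq]
  unfold soma_pares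
  have hcons := somaPares_conserve list [] []
  have hperm : (list.foldl somaParesStep ([], [])).1.Perm (PySem.Set.ofList list) := by
    rw [List.perm_ext_iff_of_nodup (somaPares_nodup list [] [] (by simp))
      (PySem.Set.nodup_ofList list)]
    intro a
    rw [somaPares_mem, PySem.Set.mem_ofList]
    simp
  have hsum := hperm.sum_eq
  simp at hcons
  omega
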